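-- pv_equiv track=rewrite | github.com/CoderRahul007/DSA | striver/Binary Search/Chess Tournament .py | chessTournament
-- ===== SOURCE A (Python) =====
-- def chessTournament(positions, n, c):
--
--     # Sorting all positions of empty rooms.
--     positions.sort()
--
--     # l is the least possible answer and r is the max possible answer.
--     ans = 0
--     l = 1
--     r = positions[n - 1]
--
--     # We will find answer by using binary search.
--     while (l <= r):
--
--         # Lets check wether the allocation is possible for mid.
--         mid = (l + r) // 2
--
--         # previous_room stores the previous occupied empty room.
--         count = 1
--         previousRoom = positions[0]
--
--         for i in range(1, n):
--
--             # If the difference between current and previous room >= mid we will allocate it.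
--             if (positions[i] - previousRoom >= mid):
--                 count += 1
--                 previousRoom = positions[i]
--
--         # Compressing length to right half if allocation is possible.
--         if (count >= c):
--             l = mid + 1
--             ans = mid
--         else:
--             r = mid - 1
--
--     # Return the variable ans
--     return ans
-- ===== SOURCE B (Python) =====
-- import bisect
--
-- def chessTournament(positions, n, c):
--     # Same max-min binary search on the answer, but the feasibility check
--     # jumps through the sorted rooms with bisect instead of a linear scan.
--     # Like A, this sorts `positions` in place.
--     positions.sort()
--     rooms = positions[:n]
--     lo, hi, ans = 1, rooms[-1], 0
--     while lo <= hi: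
--         mid = (lo + hi) // 2
--         count, prev = 1, rooms[0]
--         while True:
--             i = bisect.bisect_left(rooms, prev + mid)
--             if i >= n:
--                 break
--             count += 1
--             prev = rooms[i]
--         if count >= c:
--             ans, lo = mid, mid + 1
--         else:
--             hi = mid - 1
--     return ans
-- ===== Notes on version B (the rewrite author's own statement) =====
-- stated objective: alternative
-- what changed: The feasibility check inside the binary search on the answer is rewritten: instead of a full linear pass over all n sorted positions per candidate mid, B repeatedly jumps to the next reachable room with bisect_left(rooms, prev + mid), so each check does count-many binary-search jumps instead of one linear scan.
-- outside the precondition, e.g. on chessTournament([1, 5], 0, 1): A returns 5, B raises IndexError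
import Mathlib
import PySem

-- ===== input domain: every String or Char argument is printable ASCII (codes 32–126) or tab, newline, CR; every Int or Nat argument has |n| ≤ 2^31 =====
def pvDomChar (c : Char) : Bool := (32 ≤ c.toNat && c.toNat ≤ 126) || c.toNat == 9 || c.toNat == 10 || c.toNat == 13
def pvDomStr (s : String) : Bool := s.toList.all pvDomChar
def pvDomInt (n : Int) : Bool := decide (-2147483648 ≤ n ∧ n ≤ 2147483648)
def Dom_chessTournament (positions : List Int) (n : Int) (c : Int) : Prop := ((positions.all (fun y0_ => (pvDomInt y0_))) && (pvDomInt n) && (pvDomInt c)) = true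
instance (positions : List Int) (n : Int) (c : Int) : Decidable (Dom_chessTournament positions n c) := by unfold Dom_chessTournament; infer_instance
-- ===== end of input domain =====

-- B replaces A's linear feasibility scan by bisect jumps through the sorted rooms (an alternative
-- inner algorithm); both A and B sort `positions` in place — the equivalence proved here is about
-- the return value (the in-place mutation is the same sort in both).

-- ===== PORT A =====
-- inner 'for i in range(1, n)' pass: state = (count, previousRoom)
def chessACount (ps : List Int) (n mid : Int) : Int × Int :=
  (PySem.List.pyRange 1 n 1).foldl
    (fun st i =>
      let v := PySem.List.pyGetD ps i 0   -- positions[i]; in range under Pre_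
      if v - st.2 ≥ mid then (st.1 + 1, v) else st)
    (1, PySem.List.pyGetD ps 0 0)

-- 'while (l <= r)' binary search on the answer
def chessALoop (ps : List Int) (n c : Int) (l r ans : Int) : Int :=
  if h : l ≤ r then
    let mid := PySem.Int.floordiv (l + r) 2
    if (chessACount ps n mid).1 ≥ c then chessALoop ps n c (mid + 1) r mid
    else chessALoop ps n c l (mid - 1) ans
  else ans
termination_by (r + 1 - l).toNat
decreasing_by
  · have := PySem.Int.floordiv_two_mid_bounds h; omega
  · have := PySem.Int.floordiv_two_mid_bounds h; omega

def chessTournament (positions : List Int) (n : Int) (c : Int) : Int :=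
  let ps := PySem.List.sorted positions (fun x => x) false
  chessALoop ps n c 1 (PySem.List.pyGetD ps (n - 1) 0) 0

-- ===== PORT B =====
-- 'while True' jump loop: i = bisect_left(rooms, prev + mid); the fuel only makes the recursion
-- structural (rooms.length + 1 is enough: each jump strictly advances in the sorted rooms)
def chessBJump (rooms : List Int) (n mid : Int) : Nat → Int → Int → Int
  | 0, count, _ => count
  | fuel + 1, count, prev =>
    let i := PySem.List.bisectLeft rooms (prev + mid)
    if (i : Int) ≥ n then count
    else chessBJump rooms n mid fuel (count + 1) (PySem.List.pyGetD rooms (i : Int) 0)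

def chessBLoop (rooms : List Int) (n c : Int) (lo hi ans : Int) : Int :=
  if h : lo ≤ hi then
    let mid := PySem.Int.floordiv (lo + hi) 2
    if chessBJump rooms n mid (rooms.length + 1) 1 (PySem.List.pyGetD rooms 0 0) ≥ c then
      chessBLoop rooms n c (mid + 1) hi mid
    else chessBLoop rooms n c lo (mid - 1) ans
  else ans
termination_by (hi + 1 - lo).toNat
decreasing_by
  · have := PySem.Int.floordiv_two_mid_bounds h; omega
  · have := PySem.Int.floordiv_two_mid_bounds h; omega

def chessTournament_alt (positions : List Int) (n : Int) (c : Int) : Int :=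
  let ps := PySem.List.sorted positions (fun x => x) false
  let rooms := PySem.List.slice ps none (some n)   -- rooms = positions[:n]
  chessBLoop rooms n c 1 (PySem.List.pyGetD rooms (-1) 0) 0

-- ===== PRECONDITION & SPEC =====
-- Pre_ excludes: the n with positions[n-1] out of range, where A itself raises IndexError, and
-- n = 0, where A's positions[n-1] wraps to the last element while B's rooms = positions[:0] is
-- empty, so B raises IndexError on rooms[-1].  Every other n accepted by A — including negative n,
-- where indexing wraps and A's scan 'range(1, n)' is empty — is inside Pre_ and proved equal.
def Pre_chessTournament (positions : List Int) (n : Int) (c : Int) : Prop :=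
  positions ≠ [] ∧ 1 - (positions.length : Int) ≤ n ∧ n ≤ (positions.length : Int) ∧ n ≠ 0
instance (positions : List Int) (n : Int) (c : Int) : Decidable (Pre_chessTournament positions n c) := by
  unfold Pre_chessTournament; infer_instance

def pvWitness_chessTournament : List Int × Int × Int := ([1, 2, 9], 3, 2)

def Spec_chessTournament (positions : List Int) (n : Int) (c : Int) (out : Int) : Prop := out = chessTournament_alt positions n c
instance (positions : List Int) (n : Int) (c : Int) (out : Int) : Decidable (Spec_chessTournament positions n c out) := by unfold Spec_chessTournament; infer_instance

-- ===== CLAIM (what is proved, stated in full; the proofs are below) =====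
def Claim_equal_chessTournament : Prop := ∀ (positions : List Int) (n : Int) (c : Int), Dom_chessTournament positions n c → Pre_chessTournament positions n c → Spec_chessTournament positions n c (chessTournament positions n c)

-- ===== LEMMAS AND PROOFS =====

-- the common greedy count: rooms taken after `prev` with spacing ≥ mid, reading left to right
def pvGreedy (mid prev : Int) : List Int → Int
  | [] => 0
  | v :: t => if v - prev ≥ mid then 1 + pvGreedy mid v t else pvGreedy mid prev t

-- A's fold computes the greedy count
theorem pvFoldl_greedy (mid : Int) (t : List Int) : ∀ (cnt prev : Int),
    (t.foldl (fun st v => if v - st.2 ≥ mid then (st.1 + 1, v) else st) (cnt, prev)).1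
      = cnt + pvGreedy mid prev t := by
  induction t with
  | nil => intro cnt prev; simp [pvGreedy]
  | cons v t ih =>
    intro cnt prev
    simp only [List.foldl_cons, pvGreedy]
    by_cases h : v - prev ≥ mid
    · simp [h, ih]; ring
    · simp [h, ih]

-- the greedy count steps by dropping everything below prev + mid
theorem pvGreedy_dropWhile (mid prev : Int) (t : List Int) :
    pvGreedy mid prev t =
      match t.dropWhile (fun v => decide (v < prev + mid)) with
      | [] => 0
      | v :: rest => 1 + pvGreedy mid v rest := by
  induction t with
  | nil => simp [pvGreedy]
  | cons v t ih =>
    by_cases h : v - prev ≥ mid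
    · have : ¬ (v < prev + mid) := by omega
      simp [pvGreedy, h, this]
    · have : v < prev + mid := by omega
      simp [pvGreedy, h, this, ih]

theorem pvTake_mem (S : List Int) (p : Int → Bool) (j : Nat) (h : j < (S.takeWhile p).length) :
    ∃ hj : j < S.length, p S[j] = true := by
  have hpre := List.takeWhile_prefix (l := S) p
  have hlen : (S.takeWhile p).length ≤ S.length := hpre.length_le
  refine ⟨by omega, ?_⟩
  have : S[j] = (S.takeWhile p)[j] := (List.IsPrefix.getElem hpre h).symm
  rw [this]
  exact List.mem_takeWhile_imp (List.getElem_mem h)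

-- bisect_left over the whole sorted list = skipped prefix + takeWhile of the suffix
theorem pvBisect_eq (P S : List Int) (prev mid : Int)
    (hs : (P ++ S).Pairwise (· ≤ ·)) (hP : ∀ a ∈ P, a ≤ prev) (hm : 1 ≤ mid) :
    PySem.List.bisectLeft (P ++ S) (prev + mid)
      = P.length + (S.takeWhile (fun v => decide (v < prev + mid))).length := by
  set x := prev + mid with hxdef
  set p : Int → Bool := fun v => decide (v < x) with hp
  set L := P ++ S with hL
  set tw := (S.takeWhile p).length with htw
  have htwle : tw ≤ S.length := (List.takeWhile_prefix p).length_le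
  have hlen : L.length = P.length + S.length := by simp [hL]
  set k := P.length + tw with hk
  have hkle : k ≤ L.length := by omega
  obtain ⟨hi1, hi2, hi3⟩ := PySem.List.bisectLeft_spec L x hs
  have hmono : ∀ (a b : Nat) (hb : b < L.length) (hab : a ≤ b), L[a]'(by omega) ≤ L[b] := by
    intro a b hb hab
    rcases Nat.eq_or_lt_of_le hab with rfl | hlt
    · exact le_refl _
    · exact (List.pairwise_iff_getElem.mp hs) a b (by omega) hb hlt
  -- all indices below k hold values < x
  have hbelow : ∀ j (hj : j < L.length), j < k → L[j] < x := by
    intro j hj hjk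
    by_cases hjP : j < P.length
    · have : L[j] = P[j] := List.getElem_append_left hjP
      have : L[j] ∈ P := by rw [this]; exact List.getElem_mem hjP
      have := hP _ this
      omega
    · have hj' : j - P.length < tw := by omega
      obtain ⟨hjS, hps⟩ := pvTake_mem S p _ hj'
      have : L[j] = S[j - P.length] := List.getElem_append_right (by omega)
      rw [this]
      simpa [hp] using hps
  -- all indices at or above k hold values ≥ x
  have habove : ∀ j (hj : j < L.length), k ≤ j → x ≤ L[j] := by
    intro j hj hjk
    have htwlt : tw < S.length := by omega
    have hkL : k < L.length := by omega
    have hne : S.dropWhile p ≠ [] := by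
      have hsum : (S.takeWhile p).length + (S.dropWhile p).length = S.length := by
        rw [← List.length_append, List.takeWhile_append_dropWhile]
      intro hc; rw [hc] at hsum; simp at hsum; omega
    have hhead : p ((S.dropWhile p).head hne) = false := List.head_dropWhile_not p hne
    have hdecomp : S = S.takeWhile p ++ S.dropWhile p := (List.takeWhile_append_dropWhile).symm
    have hSk : S[tw]'htwlt = (S.dropWhile p).head hne := by
      have h1 := List.getElem_of_eq hdecomp htwlt
      rw [h1, List.getElem_append_right (by simp [htw]), List.head_eq_getElem]
      simp [htw]
    have hLk : L[k]'hkL = S[tw]'htwlt := by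
      have h2 := List.getElem_append_right (as := P) (bs := S) (i := k) (h₁ := by omega) (h₂ := by omega)
      have h3 : k - P.length = tw := by omega
      simp only [h3] at h2
      exact h2
    have hxk : x ≤ L[k]'hkL := by
      rw [hLk, hSk]
      have := hhead
      simp [hp] at this
      omega
    calc x ≤ L[k]'hkL := hxk
      _ ≤ L[j] := hmono k j hj hjk
  -- conclude bisectLeft = k
  by_contra hne
  rcases Nat.lt_or_ge (PySem.List.bisectLeft L x) k with hlt | hge
  · have h1 := hbelow (PySem.List.bisectLeft L x) (by omega) hlt
    have h2 := hi3 (PySem.List.bisectLeft L x) (by omega) (le_refl _)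
    omega
  · have hklt : k < PySem.List.bisectLeft L x := by omega
    have h1 := hi2 k (by omega) hklt
    have h2 := habove k (by omega) (le_refl _)
    omega

-- B's jump loop computes the same greedy count: rooms = consumed prefix P ++ remaining S
theorem pvJump_eq (rooms : List Int) (n mid : Int)
    (hn : (rooms.length : Int) = n) (hs : rooms.Pairwise (· ≤ ·)) (hm : 1 ≤ mid) :
    ∀ (fuel : Nat) (P S : List Int) (cnt prev : Int), rooms = P ++ S →
      (∀ a ∈ P, a ≤ prev) → S.length < fuel →
      chessBJump rooms n mid fuel cnt prev = cnt + pvGreedy mid prev S := by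
  intro fuel
  induction fuel with
  | zero => intro P S cnt prev _ _ hf; omega
  | succ fuel ih =>
    intro P S cnt prev hPS hP hf
    have hsPS : (P ++ S).Pairwise (· ≤ ·) := hPS ▸ hs
    set p : Int → Bool := fun v => decide (v < prev + mid) with hp
    have hbis : PySem.List.bisectLeft rooms (prev + mid) = P.length + (S.takeWhile p).length := by
      rw [hPS]; exact pvBisect_eq P S prev mid hsPS hP hm
    have hlen : rooms.length = P.length + S.length := by rw [hPS]; simp
    have htwle : (S.takeWhile p).length ≤ S.length := (List.takeWhile_prefix p).length_le
    have hsum : (S.takeWhile p).length + (S.dropWhile p).length = S.length := by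
      rw [← List.length_append, List.takeWhile_append_dropWhile]
    rcases hdw : S.dropWhile p with _ | ⟨v, rest⟩
    · -- no next room: takeWhile is all of S, bisect lands at rooms.length
      have htw : (S.takeWhile p).length = S.length := by rw [hdw] at hsum; simpa using hsum
      have : chessBJump rooms n mid (fuel + 1) cnt prev = cnt := by
        rw [chessBJump]
        simp only [hbis, htw]
        rw [if_pos (by omega)]
      rw [this, pvGreedy_dropWhile, ← hp, hdw]
      simp
    · -- next room v found at index P.length + tw
      set tw := (S.takeWhile p).length with htwdef
      have htwlt : tw < S.length := by rw [hdw] at hsum; simp at hsum; omega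
      have hiltn : ((P.length + tw : Nat) : Int) < n := by omega
      have hdecomp : S = S.takeWhile p ++ v :: rest := by
        conv_lhs => rw [← List.takeWhile_append_dropWhile (p := p) (l := S)]
        rw [hdw]
      have hSk : S[tw]'htwlt = v := by
        have h1 := List.getElem_of_eq hdecomp htwlt
        rw [h1, List.getElem_append_right (by omega)]
        simp [htwdef]
      have hrk : rooms[P.length + tw]'(by omega) = v := by
        rw [List.getElem_of_eq hPS (by omega), List.getElem_append_right (by omega)]
        have h3 : P.length + tw - P.length = tw := by omega
        simp only [h3]
        exact hSk
      have hget : PySem.List.pyGetD rooms ((P.length + tw : Nat) : Int) 0 = v := by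
        rw [PySem.List.pyGetD_natCast, List.getD_eq_getElem _ _ (by omega)]
        exact hrk
      have hstep : chessBJump rooms n mid (fuel + 1) cnt prev
          = chessBJump rooms n mid fuel (cnt + 1) v := by
        rw [chessBJump]
        simp only [hbis]
        rw [if_neg (by push_cast; omega), hget]
      have hv_ge : ¬ (v < prev + mid) := by
        have : p v = false := by
          have hne : S.dropWhile p ≠ [] := by rw [hdw]; simp
          have := List.head_dropWhile_not p hne
          simpa [hdw] using this
        simpa [hp] using this
      have hP' : ∀ a ∈ P ++ (S.takeWhile p ++ [v]), a ≤ v := by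
        intro a ha
        simp only [List.mem_append, List.mem_singleton] at ha
        rcases ha with haP | haT | heq
        · have := hP a haP; omega
        · have := List.mem_takeWhile_imp haT
          simp [hp] at this
          omega
        · exact le_of_eq heq
      have hrest : rooms = (P ++ (S.takeWhile p ++ [v])) ++ rest := by
        rw [hPS]; conv_lhs => rw [hdecomp]
        simp
      have hfr : rest.length < fuel := by
        have : S.length = tw + (1 + rest.length) := by rw [hdw] at hsum; simp at hsum; omega
        omega
      rw [hstep, ih _ _ (cnt + 1) v hrest hP' hfr]
      rw [pvGreedy_dropWhile mid prev S, ← hp, hdw]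
      ring

-- for 1 ≤ n (= N = rooms size) and a sorted ps, the two feasibility counts agree
theorem pvCount_eq (ps : List Int) (n mid : Int) (N : Nat)
    (hN : (N : Int) = n) (h1 : 1 ≤ N) (hlen : N ≤ ps.length)
    (hs : ps.Pairwise (· ≤ ·)) (hm : 1 ≤ mid) :
    (chessACount ps n mid).1
      = chessBJump (ps.take N) n mid ((ps.take N).length + 1) 1
          (PySem.List.pyGetD (ps.take N) 0 0) := by
  set rooms := ps.take N with hroomsdef
  have hrl : rooms.length = N := by
    rw [hroomsdef, List.length_take]; omega
  have hrs : rooms.Pairwise (· ≤ ·) := List.Pairwise.sublist (List.take_sublist N ps) hs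
  have hrne : rooms ≠ [] := by
    intro hc; rw [hc] at hrl; simp at hrl; omega
  have hget : ∀ (i : Int), 0 ≤ i → i < (N : Int) →
      PySem.List.pyGetD ps i 0 = PySem.List.pyGetD rooms i 0 := by
    intro i h0 hiN
    rw [PySem.List.pyGetD_eq_getElem ps 0 h0 (by omega),
        PySem.List.pyGetD_eq_getElem rooms 0 h0 (by omega)]
    exact (List.getElem_take).symm
  have hprev0 : PySem.List.pyGetD ps 0 0 = PySem.List.pyGetD rooms 0 0 :=
    hget 0 (le_refl 0) (by omega)
  set prev0 := PySem.List.pyGetD rooms 0 0 with hprev0def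
  -- A side reduces to a fold over rooms.drop 1
  have hA : (chessACount ps n mid).1 = 1 + pvGreedy mid prev0 (rooms.drop 1) := by
    unfold chessACount
    have hnn : n = ((rooms.length : Nat) : Int) := by omega
    rw [hnn, hprev0]
    rw [PySem.List.foldl_congr_mem (PySem.List.pyRange 1 (rooms.length : Int))
      (fun st i =>
        let v := PySem.List.pyGetD ps i 0
        if v - st.2 ≥ mid then (st.1 + 1, v) else st)
      (fun st i =>
        let v := PySem.List.pyGetD rooms i 0
        if v - st.2 ≥ mid then (st.1 + 1, v) else st)
      (1, prev0)
      (by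
        intro acc x hx
        have hmem := (PySem.List.mem_pyRange_one).mp hx
        simp only
        rw [hget x (by omega) (by omega)])]
    rw [PySem.List.foldl_pyRange_pyGetD' rooms 0
      (fun st v => if v - st.2 ≥ mid then (st.1 + 1, v) else st) (1, prev0) (by omega)]
    simp only [Int.toNat_one]
    exact pvFoldl_greedy mid (rooms.drop 1) 1 prev0
  -- B side via the jump lemma, starting from P = [rooms[0]]
  have hB : chessBJump rooms n mid (rooms.length + 1) 1 prev0
      = 1 + pvGreedy mid prev0 (rooms.drop 1) := by
    have h0 : prev0 = rooms.head hrne := by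
      rw [hprev0def, PySem.List.pyGetD_eq_getElem rooms 0 (le_refl 0) (by omega)]
      simp [List.head_eq_getElem]
    have hsplit : rooms = [prev0] ++ rooms.drop 1 := by
      rw [h0]
      simp only [List.drop_one, List.singleton_append]
      exact (List.cons_head_tail hrne).symm
    refine pvJump_eq rooms n mid (by omega) hrs hm _ _ _ 1 prev0 hsplit ?_ ?_
    · intro a ha; simp at ha; omega
    · simp only [List.length_drop]; omega
  rw [hA, ← hB]

-- equal feasibility counts make the two binary-search loops equal
theorem pvLoops_eq (ps rooms : List Int) (n c : Int)
    (hcnt : ∀ mid, 1 ≤ mid →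
      (chessACount ps n mid).1
        = chessBJump rooms n mid (rooms.length + 1) 1 (PySem.List.pyGetD rooms 0 0)) :
    ∀ l r ans, 1 ≤ l → chessALoop ps n c l r ans = chessBLoop rooms n c l r ans := by
  have H : ∀ (μ : Nat) (l r ans : Int), (r + 1 - l).toNat ≤ μ → 1 ≤ l →
      chessALoop ps n c l r ans = chessBLoop rooms n c l r ans := by
    intro μ
    induction μ with
    | zero =>
      intro l r ans hμ hl
      have hlr : ¬ l ≤ r := by omega
      rw [chessALoop, chessBLoop, dif_neg hlr, dif_neg hlr]
    | succ μ ih =>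
      intro l r ans hμ hl
      by_cases hlr : l ≤ r
      · have hmid := PySem.Int.floordiv_two_mid_bounds hlr
        set mid := PySem.Int.floordiv (l + r) 2 with hmiddef
        have hm1 : 1 ≤ mid := by omega
        rw [chessALoop, chessBLoop, dif_pos hlr, dif_pos hlr]
        simp only [← hmiddef, ← hcnt mid hm1]
        by_cases hc : (chessACount ps n mid).1 ≥ c
        · rw [if_pos hc, if_pos hc]
          exact ih (mid + 1) r mid (by omega) (by omega)
        · rw [if_neg hc, if_neg hc]
          exact ih l (mid - 1) ans (by omega) hl
      · rw [chessALoop, chessBLoop, dif_neg hlr, dif_neg hlr]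
  intro l r ans hl
  exact H (r + 1 - l).toNat l r ans (le_refl _) hl

-- ===== VERDICT (by name: the statement is the Claim_ definition above) =====
theorem chessTournament_spec : Claim_equal_chessTournament := by
  intro positions n c _hdom hpre
  obtain ⟨hne, hlo, hhi, hn0⟩ := hpre
  unfold Spec_chessTournament chessTournament chessTournament_alt
  simp only
  set ps := PySem.List.sorted positions (fun x => x) false with hpsdef
  have hlen : ps.length = positions.length := PySem.List.length_sorted positions _ false
  have hsort : ps.Pairwise (· ≤ ·) := PySem.List.sorted_pairwise positions (fun x => x)
  have hpslen : 1 ≤ ps.length := by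
    rw [hlen]; cases positions with
    | nil => exact absurd rfl hne
    | cons a t => simp
  set rooms := PySem.List.slice ps none (some n) with hroomsdef
  rcases Int.lt_or_le n 0 with hneg | hpos
  · -- n ≤ -1 : the scan range is empty on both sides, count ≡ 1
    set k := (-n).toNat with hkdef
    have hk1 : 1 ≤ k := by omega
    have hkle : k ≤ ps.length - 1 := by omega
    have hnk : n = -(k : Int) := by omega
    have hrooms : rooms = ps.take (ps.length - k) := by
      rw [hroomsdef, hnk]
      exact PySem.List.slice_to_neg_natCast ps k (by omega)
    have hrl : rooms.length = ps.length - k := by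
      rw [hrooms, List.length_take]; omega
    have hrne : rooms ≠ [] := by
      intro hc; rw [hc] at hrl; simp at hrl; omega
    -- the two right endpoints agree
    have hr : PySem.List.pyGetD ps (n - 1) 0 = PySem.List.pyGetD rooms (-1) 0 := by
      have h1 : n - 1 = -((k + 1 : Nat) : Int) := by omega
      rw [h1, PySem.List.pyGetD_neg_natCast ps (k + 1) 0 (by omega) (by omega)]
      rw [PySem.List.pyGetD_neg_one rooms 0 hrne, List.getLast_eq_getElem]
      have h3 := List.getElem_take (xs := ps) (j := ps.length - k)
        (i := rooms.length - 1) (h := by rw [← hrooms]; omega)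
      have h4 : ps.length - (k + 1) = rooms.length - 1 := by omega
      have e1 : ps[ps.length - (k + 1)]'(by omega) = ps[rooms.length - 1]'(by omega) :=
        getElem_congr rfl h4 (by omega)
      have e2 : rooms[rooms.length - 1]'(by omega)
          = (List.take (ps.length - k) ps)[rooms.length - 1]'(by rw [← hrooms]; omega) :=
        getElem_congr hrooms rfl (by omega)
      exact e1.trans ((e2.trans h3).symm)
    rw [hr]
    refine pvLoops_eq ps rooms n c ?_ 1 _ 0 (le_refl 1)
    intro mid hm
    have hA : (chessACount ps n mid).1 = 1 := by
      unfold chessACount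
      rw [PySem.List.pyRange_one_eq_nil (by omega)]
      simp
    have hB : chessBJump rooms n mid (rooms.length + 1) 1 (PySem.List.pyGetD rooms 0 0) = 1 := by
      rw [chessBJump]
      rw [if_pos (by omega)]
    rw [hA, hB]
  · -- 1 ≤ n : rooms = the first n sorted positions
    set N := n.toNat with hNdef
    have hNn : (N : Int) = n := by omega
    have hN1 : 1 ≤ N := by omega
    have hNle : N ≤ ps.length := by omega
    have hrooms : rooms = ps.take N := by
      rw [hroomsdef, PySem.List.slice_to ps (by omega)]
    have hrl : rooms.length = N := by rw [hrooms, List.length_take]; omega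
    have hrne : rooms ≠ [] := by intro hc; rw [hc] at hrl; simp at hrl; omega
    have hr : PySem.List.pyGetD ps (n - 1) 0 = PySem.List.pyGetD rooms (-1) 0 := by
      rw [PySem.List.pyGetD_eq_getElem ps 0 (by omega) (by omega)]
      rw [PySem.List.pyGetD_neg_one rooms 0 hrne, List.getLast_eq_getElem]
      have h3 := List.getElem_take (xs := ps) (j := N)
        (i := rooms.length - 1) (h := by rw [← hrooms]; omega)
      have h4 : (n - 1).toNat = rooms.length - 1 := by omega
      have e1 : ps[(n - 1).toNat]'(by omega) = ps[rooms.length - 1]'(by omega) :=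
        getElem_congr rfl h4 (by omega)
      have e2 : rooms[rooms.length - 1]'(by omega)
          = (List.take N ps)[rooms.length - 1]'(by rw [← hrooms]; omega) :=
        getElem_congr hrooms rfl (by omega)
      exact e1.trans ((e2.trans h3).symm)
    rw [hr]
    refine pvLoops_eq ps rooms n c ?_ 1 _ 0 (le_refl 1)
    intro mid hm
    rw [hrooms]
    exact pvCount_eq ps n mid N hNn hN1 hNle hsort hm
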